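-- pv_equiv track=rewrite | github.com/madhuri7112/HackerRank | stone_division.py | stoneDivision
-- ===== SOURCE A (Python) =====
-- def stoneDivision(n, s, max_divisions):
--
--     if n in max_divisions:
--         return max_divisions[n]
--     else:
--         max_div = 0
--         for divisor in s:
--             if (divisor>=n):
--                 continue
--             if (divisor!=0 and n%divisor == 0):
--                 dividend = int(n/divisor)
--                 max_div = max(max_div, 1+ (dividend* stoneDivision(divisor, s, max_divisions)))
--         max_divisions[n] = int(max_div)
--
--         return int(max_div)
-- ===== SOURCE B (Python) =====
-- def stoneDivision(n, s, max_divisions):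
--     # Bottom-up DP over the sorted distinct divisors of n found in s (read-only
--     # memo; does not mutate max_divisions -- equivalence is about the return
--     # value only).
--     tbl = {}
--     def val(v):
--         if v in max_divisions:
--             return max_divisions[v]
--         best = 0
--         for d in s:
--             if d != 0 and d < v and v % d == 0:
--                 best = max(best, 1 + (v // d) * tbl[d])
--         return int(best)
--     for v in sorted(set(d for d in s if d != 0 and n % d == 0)):
--         tbl[v] = val(v)
--     return int(val(n))
-- ===== Notes on version B (the rewrite author's own statement) =====
-- stated objective: alternative
-- what changed: Replaces the memoized top-down recursion (which threads and mutates the caller's dict) with a non-recursive bottom-up dynamic program: it sorts the distinct elements of s that divide n and fills a fresh table in increasing order, then reads the answer off the table; equivalence is about the return value only (B does not mutate max_divisions).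
import Mathlib
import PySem

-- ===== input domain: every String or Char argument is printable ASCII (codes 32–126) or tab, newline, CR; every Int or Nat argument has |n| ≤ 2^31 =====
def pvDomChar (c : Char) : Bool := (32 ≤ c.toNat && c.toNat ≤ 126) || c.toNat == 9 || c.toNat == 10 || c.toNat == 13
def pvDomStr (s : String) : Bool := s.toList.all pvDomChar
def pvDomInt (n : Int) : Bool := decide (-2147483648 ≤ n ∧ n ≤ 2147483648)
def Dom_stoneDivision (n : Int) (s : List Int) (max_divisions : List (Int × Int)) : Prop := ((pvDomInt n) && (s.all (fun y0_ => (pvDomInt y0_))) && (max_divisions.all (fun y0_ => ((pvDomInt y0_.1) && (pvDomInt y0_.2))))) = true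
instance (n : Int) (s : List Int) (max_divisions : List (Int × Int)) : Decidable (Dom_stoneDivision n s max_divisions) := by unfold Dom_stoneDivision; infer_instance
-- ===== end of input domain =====

-- B replaces A's memoized top-down recursion by a non-recursive bottom-up DP over the
-- sorted distinct divisor values; equivalence is about the RETURN value only (A mutates
-- the caller's max_divisions dict, B reads it without mutating it).

-- termination measure for the ports' recursion: how many elements of s are < n
def cnt (s : List Int) (n : Int) : Nat := (s.filter (fun d => decide (d < n))).length

theorem cnt_cons (x : Int) (t : List Int) (n : Int) :
    cnt (x :: t) n = (if x < n then 1 else 0) + cnt t n := by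
  by_cases h : x < n
  · simp [cnt, h]; omega
  · simp [cnt, h]

theorem cnt_mono (s : List Int) {d n : Int} (h : d ≤ n) : cnt s d ≤ cnt s n := by
  induction s with
  | nil => simp [cnt]
  | cons x t ih =>
    rw [cnt_cons, cnt_cons]
    by_cases hx : x < d
    · have : x < n := lt_of_lt_of_le hx h
      simp [hx, this]; omega
    · by_cases hx2 : x < n <;> simp [hx, hx2] <;> omega

theorem cnt_lt (s : List Int) {d n : Int} (hd : d ∈ s) (h : d < n) : cnt s d < cnt s n := by
  induction s with
  | nil => cases hd
  | cons x t ih =>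
    rw [cnt_cons, cnt_cons]
    rcases List.mem_cons.1 hd with he | hm
    · have h1 : cnt t d ≤ cnt t n := cnt_mono t (le_of_lt h)
      subst he
      simp only [h, if_true, lt_irrefl d, if_false]
      omega
    · have h1 := ih hm
      by_cases hx : x < d
      · have hx2 : x < n := lt_trans hx h
        simp only [hx, hx2, if_true]; omega
      · by_cases hx2 : x < n
        · simp only [hx, hx2, if_true, if_false]; omega
        · simp only [hx, hx2, if_false]; omega

-- ===== PORT A =====
-- literal transliteration of A: memoized recursion threading the dict through the loop.
-- the loop over `s` iterates over `s.attach` (same elements, membership proof carried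
-- for termination only). `int(n/divisor)`: divisor divides n and |n| ≤ 2^31 on Dom,
-- so the float division is exact and equals floor division (PySem.Int.floordiv).
mutual
def goA (s : List Int) (n : Int) (memo : PySem.Dict Int Int) : Int × PySem.Dict Int Int :=
  match PySem.Dict.get? memo n with
  | some v => (v, memo)                      -- if n in max_divisions: return max_divisions[n]
  | none =>
    let r := loopA s n s.attach 0 memo       -- max_div = 0; for divisor in s: …
    (r.1, PySem.Dict.insert r.2 n r.1)       -- max_divisions[n] = int(max_div); return int(max_div)
termination_by (cnt s n, 1, 0)
decreasing_by exact Prod.Lex.right _ (Prod.Lex.left _ _ (by omega))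

def loopA (s : List Int) (n : Int) (rest : List {x : Int // x ∈ s}) (maxDiv : Int)
    (memo : PySem.Dict Int Int) : Int × PySem.Dict Int Int :=
  match rest with
  | [] => (maxDiv, memo)
  | d :: ds =>
    if hge : d.1 ≥ n then loopA s n ds maxDiv memo          -- if divisor >= n: continue
    else if d.1 ≠ 0 ∧ PySem.Int.mod n d.1 = 0 then
      let sub := goA s d.1 memo                             -- stoneDivision(divisor, s, max_divisions)
      loopA s n ds (max maxDiv (1 + PySem.Int.floordiv n d.1 * sub.1)) sub.2
    else loopA s n ds maxDiv memo
termination_by (cnt s n, 0, rest.length)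
decreasing_by
  all_goals first
    | exact Prod.Lex.left _ _ (cnt_lt s d.2 (by omega))
    | exact Prod.Lex.right _ (Prod.Lex.right _ (by simp [List.length_cons]))
end

def stoneDivision (n : Int) (s : List Int) (max_divisions : List (Int × Int)) : Int :=
  (goA s n (PySem.Dict.mk max_divisions)).1

-- ===== PORT B =====
-- transliteration of Source B: `val(v)` (memo hit, else one pass over s reading the table),
-- then a fold filling the table over sorted(set(s)), then val(n).
def valB (memo : PySem.Dict Int Int) (s : List Int) (tbl : PySem.Dict Int Int) (v : Int) : Int :=
  match PySem.Dict.get? memo v with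
  | some w => w
  | none =>
    s.foldl (fun best d =>
      if d ≠ 0 ∧ d < v ∧ PySem.Int.mod v d = 0 then
        -- tbl[d]: every d ∈ s satisfying d < v is already a key of tbl, so getD's
        -- default is never taken (Python's tbl[d] never raises here)
        max best (1 + PySem.Int.floordiv v d * PySem.Dict.getD tbl d 0)
      else best) 0

def stoneDivision_alt (n : Int) (s : List Int) (max_divisions : List (Int × Int)) : Int :=
  let memo := PySem.Dict.mk max_divisions
  let vs := PySem.List.sorted
    (PySem.Set.ofList (s.filter (fun d => decide (d ≠ 0 ∧ PySem.Int.mod n d = 0))))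
    (fun x => x) false
  let tbl := vs.foldl (fun t v => PySem.Dict.insert t v (valB memo s t v)) (PySem.Dict.mk [])
  valB memo s tbl n

-- ===== PRECONDITION & SPEC =====
def Spec_stoneDivision (n : Int) (s : List Int) (max_divisions : List (Int × Int)) (out : Int) : Prop := out = stoneDivision_alt n s max_divisions
instance (n : Int) (s : List Int) (max_divisions : List (Int × Int)) (out : Int) : Decidable (Spec_stoneDivision n s max_divisions out) := by unfold Spec_stoneDivision; infer_instance

-- ===== CLAIM (what is proved, stated in full; the proofs are below) =====
def Claim_equal_stoneDivision : Prop := ∀ (n : Int) (s : List Int) (max_divisions : List (Int × Int)), Dom_stoneDivision n s max_divisions → Spec_stoneDivision n s max_divisions (stoneDivision n s max_divisions)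

-- ===== LEMMAS AND PROOFS =====

-- the pure value A computes w.r.t. the INITIAL memo (proof-side specification)
mutual
def fpure (memo0 : PySem.Dict Int Int) (s : List Int) (n : Int) : Int :=
  match PySem.Dict.get? memo0 n with
  | some v => v
  | none => floop memo0 s n s.attach 0
termination_by (cnt s n, 1, 0)
decreasing_by exact Prod.Lex.right _ (Prod.Lex.left _ _ (by omega))

def floop (memo0 : PySem.Dict Int Int) (s : List Int) (n : Int)
    (rest : List {x : Int // x ∈ s}) (acc : Int) : Int :=
  match rest with
  | [] => acc
  | d :: ds =>
    if hge : d.1 ≥ n then floop memo0 s n ds acc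
    else if d.1 ≠ 0 ∧ PySem.Int.mod n d.1 = 0 then
      floop memo0 s n ds (max acc (1 + PySem.Int.floordiv n d.1 * fpure memo0 s d.1))
    else floop memo0 s n ds acc
termination_by (cnt s n, 0, rest.length)
decreasing_by
  all_goals first
    | exact Prod.Lex.left _ _ (cnt_lt s d.2 (by omega))
    | exact Prod.Lex.right _ (Prod.Lex.right _ (by simp [List.length_cons]))
end

-- a memo dict m is a consistent extension of memo0: every stored value is the pure
-- value, and every key of memo0 is still present
def ExtMemo (memo0 : PySem.Dict Int Int) (s : List Int) (m : PySem.Dict Int Int) : Prop :=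
  (∀ k v, PySem.Dict.get? m k = some v → fpure memo0 s k = v) ∧
  (∀ k, (PySem.Dict.get? memo0 k).isSome = true → (PySem.Dict.get? m k).isSome = true)

mutual
theorem goA_correct (memo0 : PySem.Dict Int Int) (s : List Int) (n : Int)
    (m : PySem.Dict Int Int) (hm : ExtMemo memo0 s m) :
    (goA s n m).1 = fpure memo0 s n ∧ ExtMemo memo0 s (goA s n m).2 := by
  cases hmem : PySem.Dict.get? m n with
  | some v =>
    rw [goA.eq_def, hmem]
    exact ⟨(hm.1 n v hmem).symm, hm⟩
  | none =>
    have h0 : PySem.Dict.get? memo0 n = none := by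
      cases h : PySem.Dict.get? memo0 n with
      | none => rfl
      | some w =>
        have := hm.2 n (by rw [h]; rfl)
        rw [hmem] at this; cases this
    have hl := loopA_correct memo0 s n s.attach 0 m hm
    refine ⟨?_, ?_⟩
    · rw [goA.eq_def, hmem, fpure.eq_def, h0]
      exact hl.1.symm.symm
    · rw [goA.eq_def, hmem]
      refine ⟨?_, ?_⟩
      · intro k v hk
        by_cases hkn : k = n
        · subst hkn
          rw [PySem.Dict.get?_insert_self] at hk
          cases hk
          rw [fpure.eq_def, h0]
          exact hl.1.symm
        · rw [PySem.Dict.get?_insert_of_ne _ _ hkn] at hk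
          exact hl.2.1 k v hk
      · intro k hk
        by_cases hkn : k = n
        · subst hkn; rw [PySem.Dict.get?_insert_self]; rfl
        · rw [PySem.Dict.get?_insert_of_ne _ _ hkn]
          exact hl.2.2 k hk
termination_by (cnt s n, 1, 0)
decreasing_by exact Prod.Lex.right _ (Prod.Lex.left _ _ (by omega))

theorem loopA_correct (memo0 : PySem.Dict Int Int) (s : List Int) (n : Int)
    (rest : List {x : Int // x ∈ s}) (acc : Int) (m : PySem.Dict Int Int)
    (hm : ExtMemo memo0 s m) :
    (loopA s n rest acc m).1 = floop memo0 s n rest acc ∧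
      ExtMemo memo0 s (loopA s n rest acc m).2 := by
  match rest with
  | [] =>
    rw [loopA.eq_def, floop.eq_def]
    exact ⟨rfl, hm⟩
  | d :: ds =>
    rw [loopA.eq_def, floop.eq_def]
    by_cases hge : d.1 ≥ n
    · simp only [hge, dite_true]
      exact loopA_correct memo0 s n ds acc m hm
    · simp only [hge, dite_false]
      by_cases hc : d.1 ≠ 0 ∧ PySem.Int.mod n d.1 = 0
      · rw [if_pos hc, if_pos hc]
        have hg := goA_correct memo0 s d.1 m hm
        rw [hg.1]
        exact loopA_correct memo0 s n ds
          (max acc (1 + PySem.Int.floordiv n d.1 * fpure memo0 s d.1)) _ hg.2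
      · rw [if_neg hc, if_neg hc]
        exact loopA_correct memo0 s n ds acc m hm
termination_by (cnt s n, 0, rest.length)
decreasing_by
  all_goals first
    | exact Prod.Lex.left _ _ (cnt_lt s d.2 (by omega))
    | exact Prod.Lex.right _ (Prod.Lex.right _ (by simp [List.length_cons]))
end

theorem floop_eq_foldl (memo0 : PySem.Dict Int Int) (s : List Int) (v : Int)
    (tbl : PySem.Dict Int Int)
    (htbl : ∀ d, d ∈ s → d < v → d ≠ 0 → PySem.Int.mod v d = 0 →
      PySem.Dict.get? tbl d = some (fpure memo0 s d)) :
    ∀ (rest : List {x : Int // x ∈ s}) (acc : Int),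
      floop memo0 s v rest acc =
        (rest.map Subtype.val).foldl (fun best d =>
          if d ≠ 0 ∧ d < v ∧ PySem.Int.mod v d = 0 then
            max best (1 + PySem.Int.floordiv v d * PySem.Dict.getD tbl d 0)
          else best) acc := by
  intro rest
  induction rest with
  | nil => intro acc; rw [floop.eq_def]; rfl
  | cons d ds ih =>
    intro acc
    rw [floop.eq_def]
    simp only [List.map_cons, List.foldl_cons]
    by_cases hge : d.1 ≥ v
    · have hcond : ¬(d.1 ≠ 0 ∧ d.1 < v ∧ PySem.Int.mod v d.1 = 0) := by
        rintro ⟨-, h2, -⟩; omega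
      rw [dif_pos hge, if_neg hcond]
      exact ih acc
    · have hlt : d.1 < v := by omega
      rw [dif_neg hge]
      by_cases hc : d.1 ≠ 0 ∧ PySem.Int.mod v d.1 = 0
      · have hcond : d.1 ≠ 0 ∧ d.1 < v ∧ PySem.Int.mod v d.1 = 0 := ⟨hc.1, hlt, hc.2⟩
        rw [if_pos hc, if_pos hcond, PySem.Dict.getD_eq_get?_getD, htbl d.1 d.2 hlt hc.1 hc.2]
        exact ih _
      · have hcond : ¬(d.1 ≠ 0 ∧ d.1 < v ∧ PySem.Int.mod v d.1 = 0) := by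
          rintro ⟨h1, -, h3⟩; exact hc ⟨h1, h3⟩
        rw [if_neg hc, if_neg hcond]
        exact ih acc

theorem valB_correct (memo0 : PySem.Dict Int Int) (s : List Int)
    (tbl : PySem.Dict Int Int) (v : Int)
    (htbl : ∀ d, d ∈ s → d < v → d ≠ 0 → PySem.Int.mod v d = 0 →
      PySem.Dict.get? tbl d = some (fpure memo0 s d)) :
    valB memo0 s tbl v = fpure memo0 s v := by
  rw [valB.eq_def, fpure]
  cases h : PySem.Dict.get? memo0 v with
  | some w => rfl
  | none =>
    rw [floop_eq_foldl memo0 s v tbl htbl s.attach 0, List.attach_map_subtype_val]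

theorem tbl_build (memo0 : PySem.Dict Int Int) (s : List Int) (n : Int) :
    ∀ (l : List Int) (tbl : PySem.Dict Int Int),
      l.Pairwise (· < ·) →
      (∀ x, x ∈ l → x ≠ 0 ∧ PySem.Int.mod n x = 0) →
      (∀ d, d ∈ s → d ≠ 0 → PySem.Int.mod n d = 0 → d ∉ l →
        PySem.Dict.get? tbl d = some (fpure memo0 s d)) →
      ∀ d, d ∈ s → d ≠ 0 → PySem.Int.mod n d = 0 →
        PySem.Dict.get?
          (l.foldl (fun t v => PySem.Dict.insert t v (valB memo0 s t v)) tbl) d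
          = some (fpure memo0 s d) := by
  intro l
  induction l with
  | nil => intro tbl _ _ H d hd hd0 hdn; simpa using H d hd hd0 hdn (by simp)
  | cons v l' ih =>
    intro tbl hp hcond H d hd hd0 hdn
    simp only [List.foldl_cons]
    have hv := (List.pairwise_cons.1 hp).1
    have hvn : v ∣ n := (PySem.Int.mod_eq_zero_iff_dvd n v).1 (hcond v (by simp)).2
    have hval : valB memo0 s tbl v = fpure memo0 s v := by
      apply valB_correct
      intro d' hd' hlt hd0' hmod
      have hd'n : PySem.Int.mod n d' = 0 :=
        (PySem.Int.mod_eq_zero_iff_dvd n d').2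
          (dvd_trans ((PySem.Int.mod_eq_zero_iff_dvd v d').1 hmod) hvn)
      apply H d' hd' hd0' hd'n
      intro hmem
      rcases List.mem_cons.1 hmem with he | hm
      · subst he; exact lt_irrefl _ hlt
      · exact absurd hlt (not_lt.2 (le_of_lt (hv d' hm)))
    apply ih _ (List.pairwise_cons.1 hp).2 (fun x hx => hcond x (by simp [hx])) _ d hd hd0 hdn
    intro d' hd' hd0' hd'n hnl
    by_cases hdv : d' = v
    · subst hdv
      rw [PySem.Dict.get?_insert_self, hval]
    · rw [PySem.Dict.get?_insert_of_ne _ _ hdv]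
      exact H d' hd' hd0' hd'n (by simp [hdv, hnl])

-- ===== VERDICT (by name: the statement is the Claim_ definition above) =====
theorem stoneDivision_spec : Claim_equal_stoneDivision := by
  unfold Claim_equal_stoneDivision Spec_stoneDivision
  intro n s md _
  have hExt0 : ExtMemo (PySem.Dict.mk md) s (PySem.Dict.mk md) :=
    ⟨fun k v h => by rw [fpure.eq_def, h], fun k h => h⟩
  have hA := (goA_correct (PySem.Dict.mk md) s n (PySem.Dict.mk md) hExt0).1
  unfold stoneDivision stoneDivision_alt
  rw [hA]
  have hvs : (PySem.List.sorted
      (PySem.Set.ofList (s.filter (fun d => decide (d ≠ 0 ∧ PySem.Int.mod n d = 0))))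
      (fun x => x) false).Pairwise (· < ·) :=
    PySem.List.sorted_ofList_pairwise_lt _
  have hmemvs : ∀ x, x ∈ (PySem.List.sorted
      (PySem.Set.ofList (s.filter (fun d => decide (d ≠ 0 ∧ PySem.Int.mod n d = 0))))
      (fun x => x) false) ↔
      x ∈ s.filter (fun d => decide (d ≠ 0 ∧ PySem.Int.mod n d = 0)) := by
    intro x
    rw [PySem.List.mem_sorted]
    exact PySem.Set.mem_ofList _ _
  have htbl := tbl_build (PySem.Dict.mk md) s n
    (PySem.List.sorted
      (PySem.Set.ofList (s.filter (fun d => decide (d ≠ 0 ∧ PySem.Int.mod n d = 0))))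
      (fun x => x) false)
    (PySem.Dict.mk []) hvs
    (fun x hx => by
      have := List.mem_filter.1 ((hmemvs x).1 hx)
      exact of_decide_eq_true this.2)
    (fun d hd hd0 hdn hnl => absurd
      ((hmemvs d).2 (List.mem_filter.2 ⟨hd, decide_eq_true ⟨hd0, hdn⟩⟩)) hnl)
  exact (valB_correct (PySem.Dict.mk md) s _ n (fun d hd _ hd0 hmod => htbl d hd hd0 hmod)).symm
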